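-- pv_equiv track=rewrite | github.com/cwjki/DAA-problems | Problema 2/code/fuerza_bruta.py | count
-- ===== SOURCE A (Python) =====
-- def count(bolos,comb,d):
--     resp = 0
--     mask = [0]*len(bolos)
--     for i in range(0,len(comb)):
--         if comb[i] == 1:
--             for j in range(i,min(i+d,len(comb))):
--                 if mask[j] != 1:
--                     resp += bolos[j]
--                     mask[j] = 1
--     return resp
-- ===== SOURCE B (Python) =====
-- def count(bolos, comb, d):
--     # prefix sums of bolos, then sweep the 1-positions left to right,
--     # adding only the part of each d-interval beyond the covered frontier
--     pref = [0]
--     s = 0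
--     for b in bolos:
--         s += b
--         pref.append(s)
--     n = len(comb)
--     resp = 0
--     cov = 0
--     for i, c in enumerate(comb):
--         if c == 1:
--             e = min(i + d, n)
--             lo = max(i, cov)
--             if lo < e:
--                 resp += pref[e] - pref[lo]
--                 cov = e
--     return resp
-- ===== Notes on version B (the rewrite author's own statement) =====
-- stated objective: alternative
-- what changed: Replaces the inner per-element masked scan with prefix sums and a single covered-frontier pointer: each 1-position adds pref[e]-pref[max(i,cov)] in one step instead of walking its d-interval with a mask.
import Mathlib
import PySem

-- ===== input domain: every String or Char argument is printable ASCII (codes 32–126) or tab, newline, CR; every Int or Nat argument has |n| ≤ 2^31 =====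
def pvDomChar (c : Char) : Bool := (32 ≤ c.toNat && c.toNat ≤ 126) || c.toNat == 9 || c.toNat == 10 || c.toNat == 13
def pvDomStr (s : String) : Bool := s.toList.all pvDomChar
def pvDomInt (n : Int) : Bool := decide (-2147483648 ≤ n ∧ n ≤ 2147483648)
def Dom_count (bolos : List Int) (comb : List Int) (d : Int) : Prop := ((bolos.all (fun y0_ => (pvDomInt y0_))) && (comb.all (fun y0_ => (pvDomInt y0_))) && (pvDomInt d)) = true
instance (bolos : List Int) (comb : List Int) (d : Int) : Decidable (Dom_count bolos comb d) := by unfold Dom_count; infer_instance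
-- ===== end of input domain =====

-- B replaces A's per-element masked scan by prefix sums plus a covered-frontier pointer (a different algorithm of similar measured cost).

-- ===== PORT A =====
-- inner loop body: 'if mask[j] != 1: resp += bolos[j]; mask[j] = 1'
def countInner (bolos : List Int) (st : Int × List Int) (j : Int) : Int × List Int :=
  if PySem.List.pyGetD st.2 j 0 ≠ 1 then
    (st.1 + PySem.List.pyGetD bolos j 0, PySem.List.pySetD st.2 j 1)
  else st

-- outer loop body: 'if comb[i] == 1: for j in range(i, min(i+d, len(comb))): …'
def countOuter (bolos : List Int) (comb : List Int) (d : Int) (st : Int × List Int) (i : Int) : Int × List Int :=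
  if PySem.List.pyGetD comb i 0 = 1 then
    (PySem.List.pyRange i (min (i + d) (comb.length : Int)) 1).foldl (countInner bolos) st
  else st

def count (bolos : List Int) (comb : List Int) (d : Int) : Int :=
  ((PySem.List.pyRange 0 (comb.length : Int) 1).foldl (countOuter bolos comb d)
    (0, List.replicate bolos.length 0)).1

-- ===== PORT B =====
-- 's += b; pref.append(s)'
def prefStep (ps : List Int × Int) (b : Int) : List Int × Int := (ps.1 ++ [ps.2 + b], ps.2 + b)

-- loop body: 'if c == 1: e = min(i+d, n); lo = max(i, cov); if lo < e: resp += pref[e]-pref[lo]; cov = e'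
def altStep (pref : List Int) (n : Int) (d : Int) (st : Int × Int) (ic : Int × Int) : Int × Int :=
  if ic.2 = 1 then
    if max ic.1 st.2 < min (ic.1 + d) n then
      (st.1 + (PySem.List.pyGetD pref (min (ic.1 + d) n) 0
               - PySem.List.pyGetD pref (max ic.1 st.2) 0), min (ic.1 + d) n)
    else st
  else st

def count_alt (bolos : List Int) (comb : List Int) (d : Int) : Int :=
  let pref := (bolos.foldl prefStep ([0], 0)).1
  ((PySem.List.enumerate comb 0).foldl (altStep pref (comb.length : Int) d) (0, 0)).1

-- ===== PRECONDITION & SPEC =====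
-- Pre_count excludes exactly the inputs where A raises IndexError: a 1 in comb whose
-- d-interval (clipped to len(comb)) reaches an index ≥ len(bolos) = len(mask).
def Pre_count (bolos : List Int) (comb : List Int) (d : Int) : Prop :=
  ∀ i : Nat, i < comb.length → comb.getD i 0 = 1 →
    min ((i : Int) + d) (comb.length : Int) ≤ max (i : Int) (bolos.length : Int)
instance (bolos : List Int) (comb : List Int) (d : Int) : Decidable (Pre_count bolos comb d) := by
  unfold Pre_count; infer_instance

def pvWitness_count : List Int × List Int × Int := ([3, 1, 4], [1, 0, 1], 2)

def Spec_count (bolos : List Int) (comb : List Int) (d : Int) (out : Int) : Prop := out = count_alt bolos comb d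
instance (bolos : List Int) (comb : List Int) (d : Int) (out : Int) : Decidable (Spec_count bolos comb d out) := by unfold Spec_count; infer_instance

-- ===== CLAIM (what is proved, stated in full; the proofs are below) =====
def Claim_equal_count : Prop := ∀ (bolos : List Int) (comb : List Int) (d : Int), Dom_count bolos comb d → Pre_count bolos comb d → Spec_count bolos comb d (count bolos comb d)

-- ===== LEMMAS AND PROOFS =====

-- prefix-sum list characterization
def psum (s : Int) : List Int → List Int
  | [] => []
  | b :: bs => (s + b) :: psum (s + b) bs

theorem foldl_prefStep (l : List Int) : ∀ (acc : List Int) (s : Int),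
    l.foldl prefStep (acc, s) = (acc ++ psum s l, s + l.sum) := by
  induction l with
  | nil => intro acc s; simp [psum]
  | cons b bs ih =>
      intro acc s
      simp only [List.foldl_cons, prefStep, psum, ih, List.sum_cons]
      rw [Prod.mk.injEq]
      exact ⟨by simp, by ring⟩

theorem psum_getD (l : List Int) : ∀ (s : Int) (t : Nat), t < l.length →
    (psum s l).getD t 0 = s + (l.take (t + 1)).sum := by
  induction l with
  | nil => intro s t ht; simp at ht
  | cons b bs ih =>
      intro s t ht
      cases t with
      | zero => simp [psum]
      | succ t =>
          simp only [psum, List.getD_cons_succ, List.take_succ_cons, List.sum_cons]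
          rw [ih (s + b) t (by simpa using ht)]
          ring

theorem pref_getD (bolos : List Int) (t : Nat) (ht : t ≤ bolos.length) :
    ((bolos.foldl prefStep ([0], 0)).1).getD t 0 = (bolos.take t).sum := by
  have h : bolos.foldl prefStep ([(0 : Int)], 0) = ([0] ++ psum 0 bolos, 0 + bolos.sum) :=
    foldl_prefStep bolos [0] 0
  rw [h]
  cases t with
  | zero => simp
  | succ t =>
      simp only [List.cons_append, List.nil_append, List.getD_cons_succ]
      rw [psum_getD bolos 0 t (by omega)]
      simp

theorem pref_pyGetD (bolos : List Int) (e : Int) (h0 : 0 ≤ e) (h : e ≤ (bolos.length : Int)) :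
    PySem.List.pyGetD ((bolos.foldl prefStep ([0], 0)).1) e 0 = (bolos.take e.toNat).sum := by
  have : e = ((e.toNat : Nat) : Int) := by omega
  rw [this, PySem.List.pyGetD_natCast, pref_getD bolos e.toNat (by omega)]
  congr 2

theorem sum_take_succ (l : List Int) (t : Nat) (h : t < l.length) :
    (l.take (t + 1)).sum = (l.take t).sum + l.getD t 0 := by
  rw [List.take_add_one, List.sum_append]
  simp [List.getD, List.getElem?_eq_getElem h]

-- sum of bolos over an in-range integer range, as a difference of prefix sums
theorem sum_range_pref (bolos : List Int) : ∀ (c : Nat) (s : Nat), s + c ≤ bolos.length →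
    ((PySem.List.pyRange (s : Int) (((s + c : Nat) : Int)) 1).map
      (fun j => PySem.List.pyGetD bolos j 0)).sum
    = (bolos.take (s + c)).sum - (bolos.take s).sum := by
  intro c
  induction c with
  | zero => intro s h; rw [PySem.List.pyRange_one_eq_nil (by simp)]; simp
  | succ c ih =>
      intro s h
      rw [PySem.List.pyRange_one_cons (by push_cast; omega)]
      simp only [List.map_cons, List.sum_cons, PySem.List.pyGetD_natCast]
      have e1 : ((s : Int) + 1) = (((s + 1 : Nat)) : Int) := by push_cast; ring
      have e2 : (((s + (c + 1) : Nat)) : Int) = (((s + 1 + c : Nat)) : Int) := by push_cast; ring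
      rw [e1, e2, ih (s + 1) (by omega)]
      have h1 := sum_take_succ bolos s (by omega)
      have h2 : s + (c + 1) = s + 1 + c := by omega
      rw [h2, h1]
      ring

-- inner loop of A over range(a, a+c): adds the unmasked bolos, sets the whole window to 1
theorem inner_spec (bolos : List Int) : ∀ (c : Nat) (na : Nat) (resp : Int) (mask : List Int),
    (na : Int) + (c : Int) ≤ (mask.length : Int) →
    ((PySem.List.pyRange (na : Int) ((na : Int) + (c : Int)) 1).foldl (countInner bolos) (resp, mask)).1
      = resp + ((PySem.List.pyRange (na : Int) ((na : Int) + (c : Int)) 1).map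
          (fun j => if mask.getD j.toNat 0 = 1 then 0 else PySem.List.pyGetD bolos j 0)).sum
    ∧ ((PySem.List.pyRange (na : Int) ((na : Int) + (c : Int)) 1).foldl (countInner bolos) (resp, mask)).2.length = mask.length
    ∧ ∀ t : Nat, ((PySem.List.pyRange (na : Int) ((na : Int) + (c : Int)) 1).foldl (countInner bolos) (resp, mask)).2.getD t 0
        = if (na : Int) ≤ (t : Int) ∧ (t : Int) < (na : Int) + (c : Int) then 1 else mask.getD t 0 := by
  intro c
  induction c with
  | zero =>
      intro na resp mask hlen
      rw [PySem.List.pyRange_one_eq_nil (by omega)]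
      refine ⟨by simp, rfl, ?_⟩
      intro t
      rw [if_neg (by omega)]
      rfl
  | succ c ih =>
      intro na resp mask hlen
      have hna : na < mask.length := by omega
      rw [PySem.List.pyRange_one_cons (by push_cast; omega)]
      simp only [List.foldl_cons, List.map_cons, List.sum_cons]
      have hb : (na : Int) + ((c + 1 : Nat) : Int) = ((na + 1 : Nat) : Int) + (c : Int) := by
        push_cast; ring
      rw [hb, show (na : Int) + 1 = ((na + 1 : Nat) : Int) from by push_cast; ring]
      simp only [Int.toNat_natCast]
      have hgd : PySem.List.pyGetD mask (na : Int) 0 = mask.getD na 0 := by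
        rw [PySem.List.pyGetD_natCast]
      by_cases hm : mask.getD na 0 = 1
      · rw [countInner, if_neg (by rw [hgd]; simpa using hm)]
        obtain ⟨ih1, ih2, ih3⟩ := ih (na + 1) resp mask (by push_cast; push_cast at hlen; omega)
        refine ⟨?_, ih2, ?_⟩
        · rw [ih1, if_pos hm]
          ring
        · intro t
          rw [ih3 t]
          by_cases hta : t = na
          · subst hta
            rw [if_neg (by push_cast; omega), if_pos (by push_cast; omega), hm]
          · exact if_congr (by omega) rfl rfl
      · rw [countInner, if_pos (by rw [hgd]; simpa using hm)]
        have hset : PySem.List.pySetD mask (na : Int) 1 = mask.set na 1 :=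
          PySem.List.pySetD_natCast mask na 1
        rw [hset]
        have hlen1 : ((na + 1 : Nat) : Int) + (c : Int) ≤ ((mask.set na 1).length : Int) := by
          simp only [List.length_set]; push_cast; push_cast at hlen; omega
        obtain ⟨ih1, ih2, ih3⟩ := ih (na + 1) (resp + PySem.List.pyGetD bolos (na : Int) 0)
          (mask.set na 1) hlen1
        have hset_ne : ∀ t : Nat, t ≠ na → (mask.set na 1).getD t 0 = mask.getD t 0 := by
          intro t ht
          simp [List.getD, List.getElem?_set_ne (by omega : na ≠ t)]
        have hset_self : (mask.set na 1).getD na 0 = 1 := by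
          simp [List.getD, hna]
        refine ⟨?_, by simpa using ih2, ?_⟩
        · rw [ih1, if_neg hm]
          have hcong : ((PySem.List.pyRange ((na + 1 : Nat) : Int) (((na + 1 : Nat) : Int) + (c : Int)) 1).map
                (fun j => if (mask.set na 1).getD j.toNat 0 = 1 then 0 else PySem.List.pyGetD bolos j 0)).sum
              = ((PySem.List.pyRange ((na + 1 : Nat) : Int) (((na + 1 : Nat) : Int) + (c : Int)) 1).map
                (fun j => if mask.getD j.toNat 0 = 1 then 0 else PySem.List.pyGetD bolos j 0)).sum := by
            refine congrArg List.sum (List.map_congr_left ?_)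
            intro j hj
            rw [PySem.List.mem_pyRange_one] at hj
            rw [hset_ne j.toNat (by omega)]
          rw [hcong]
          ring
        · intro t
          rw [ih3 t]
          by_cases hta : t = na
          · subst hta
            rw [if_neg (by push_cast; omega), if_pos (by push_cast; omega), hset_self]
          · rw [hset_ne t hta]
            exact if_congr (by omega) rfl rfl

-- states after k outer iterations (proof helpers)
def stA (bolos comb : List Int) (d : Int) (k : Nat) : Int × List Int :=
  (PySem.List.pyRange 0 (k : Int) 1).foldl (countOuter bolos comb d) (0, List.replicate bolos.length 0)

def stB (bolos comb : List Int) (d : Int) (k : Nat) : Int × Int :=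
  (PySem.List.enumerate (comb.take k) 0).foldl
    (altStep ((bolos.foldl prefStep ([0], 0)).1) (comb.length : Int) d) (0, 0)

-- the invariant relating the two loops after k steps
def LoopInv (bolos comb : List Int) (d : Int) (k : Nat) : Prop :=
  (stA bolos comb d k).1 = (stB bolos comb d k).1
  ∧ (stA bolos comb d k).2.length = bolos.length
  ∧ 0 ≤ (stB bolos comb d k).2 ∧ (stB bolos comb d k).2 ≤ (bolos.length : Int)
  ∧ (∀ t : Nat, t < bolos.length → (stA bolos comb d k).2.getD t 0 = 1 → (t : Int) < (stB bolos comb d k).2)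
  ∧ (∀ t : Nat, t < bolos.length → (k : Int) ≤ (t : Int) → (t : Int) < (stB bolos comb d k).2 →
      (stA bolos comb d k).2.getD t 0 = 1)

theorem stA_succ (bolos comb : List Int) (d : Int) (k : Nat) :
    stA bolos comb d (k + 1) = countOuter bolos comb d (stA bolos comb d k) (k : Int) := by
  unfold stA
  rw [show ((k + 1 : Nat) : Int) = (k : Int) + 1 by push_cast; ring,
    PySem.List.pyRange_one_succ_right (by positivity), List.foldl_append]
  rfl

theorem stB_succ (bolos comb : List Int) (d : Int) (k : Nat) (hk : k < comb.length) :
    stB bolos comb d (k + 1)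
      = altStep ((bolos.foldl prefStep ([0], 0)).1) (comb.length : Int) d
          (stB bolos comb d k) ((k : Int), comb[k]) := by
  unfold stB
  rw [List.take_add_one, List.getElem?_eq_getElem hk]
  simp only [Option.toList_some]
  rw [PySem.List.enumerate_append, List.foldl_append]
  have hlen : (comb.take k).length = k := by simp [List.length_take]; omega
  rw [hlen]
  simp [PySem.List.enumerate_cons, PySem.List.enumerate_nil]

theorem main_inv (bolos comb : List Int) (d : Int) (hpre : Pre_count bolos comb d) :
    ∀ k : Nat, k ≤ comb.length → LoopInv bolos comb d k := by
  intro k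
  induction k with
  | zero =>
      intro _
      unfold LoopInv stA stB
      rw [show ((0 : Nat) : Int) = 0 from by simp, PySem.List.pyRange_one_eq_nil (le_refl 0)]
      simp only [List.take_zero, PySem.List.enumerate_nil, List.foldl_nil]
      refine ⟨by simp, by simp, by simp, by positivity, ?_, ?_⟩
      · intro t ht h1
        exfalso
        simp at h1
      · intro t ht h1 h2
        exfalso; omega
  | succ k ih =>
      intro hk1
      have hk : k < comb.length := by omega
      obtain ⟨h1, h2, h3, h4, h5, h6⟩ := ih (by omega)
      unfold LoopInv
      rw [stA_succ, stB_succ bolos comb d k hk]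
      set pref := (bolos.foldl prefStep ([0], 0)).1 with hprefdef
      set Ak := stA bolos comb d k with hAk
      set Bk := stB bolos comb d k with hBk
      have hguardA : PySem.List.pyGetD comb (k : Int) 0 = comb.getD k 0 := by
        rw [PySem.List.pyGetD_natCast]
      have hgetd : comb.getD k 0 = comb[k] := List.getD_eq_getElem comb 0 hk
      by_cases hc : comb[k] = 1
      · -- comb[k] == 1
        have he := hpre k hk (by rw [hgetd]; exact hc)
        set e := min ((k : Int) + d) (comb.length : Int) with hedef
        set lo := max (k : Int) Bk.2 with hlodef
        rw [countOuter, if_pos (by rw [hguardA, hgetd]; exact hc)]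
        rw [altStep]
        simp only [if_pos hc]
        rw [← hedef, ← hlodef]
        by_cases hlt : lo < e
        · -- B adds pref[e] - pref[lo]; A walks the window
          have hklo : (k : Int) ≤ lo := le_max_left _ _
          have hcovlo : Bk.2 ≤ lo := le_max_right _ _
          have hke : (k : Int) < e := by omega
          have helb : e ≤ (bolos.length : Int) := by omega
          set c := (e - (k : Int)).toNat with hcdef
          have hec : e = (k : Int) + (c : Int) := by omega
          obtain ⟨s1, s2, s3⟩ := inner_spec bolos c k Ak.1 Ak.2 (by rw [h2]; omega)
          rw [if_pos hlt]
          rw [hec, s1]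
          have hsum : ((PySem.List.pyRange (k : Int) ((k : Int) + (c : Int)) 1).map
                (fun j => if Ak.2.getD j.toNat 0 = 1 then 0 else PySem.List.pyGetD bolos j 0)).sum
              = PySem.List.pyGetD pref e 0 - PySem.List.pyGetD pref lo 0 := by
            rw [← hec]
            rw [PySem.List.pyRange_one_append (k : Int) lo e hklo (le_of_lt hlt)]
            rw [List.map_append, List.sum_append]
            have hz : ((PySem.List.pyRange (k : Int) lo 1).map
                (fun j => if Ak.2.getD j.toNat 0 = 1 then 0 else PySem.List.pyGetD bolos j 0)).sum = 0 := by
              apply List.sum_eq_zero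
              intro x hx
              rw [List.mem_map] at hx
              obtain ⟨j, hj, hx⟩ := hx
              rw [PySem.List.mem_pyRange_one] at hj
              have hjcov : j < Bk.2 := by omega
              have hj0 : 0 ≤ j := by omega
              have hjlb : j.toNat < bolos.length := by omega
              rw [h6 j.toNat hjlb (by omega) (by omega)] at hx
              simpa using hx.symm
            rw [hz]
            have hcong2 : ((PySem.List.pyRange lo e 1).map
                  (fun j => if Ak.2.getD j.toNat 0 = 1 then 0 else PySem.List.pyGetD bolos j 0))
                = ((PySem.List.pyRange lo e 1).map (fun j => PySem.List.pyGetD bolos j 0)) := by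
              apply List.map_congr_left
              intro j hj
              rw [PySem.List.mem_pyRange_one] at hj
              have hj0 : 0 ≤ j := by omega
              have hjlb : j.toNat < bolos.length := by omega
              rw [if_neg ?_]
              intro habs
              have := h5 j.toNat hjlb habs
              omega
            rw [hcong2]
            have hlo0 : 0 ≤ lo := by omega
            have he0 : 0 ≤ e := by omega
            set c2 := (e - lo).toNat with hc2def
            have hle1 : lo.toNat + c2 ≤ bolos.length := by omega
            have hs := sum_range_pref bolos c2 lo.toNat hle1
            rw [show ((lo.toNat : Nat) : Int) = lo from by omega,
                show ((lo.toNat + c2 : Nat) : Int) = e from by push_cast; omega] at hs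
            rw [hs, hprefdef, pref_pyGetD bolos e he0 helb,
                pref_pyGetD bolos lo hlo0 (by omega)]
            have hte : lo.toNat + c2 = e.toNat := by omega
            rw [hte]
            omega
          rw [hsum]
          refine ⟨by rw [h1, hec], by rw [s2, h2], by omega, by omega, ?_, ?_⟩
          · intro t ht hmask
            rw [s3 t] at hmask
            split_ifs at hmask with hw
            · omega
            · have := h5 t ht hmask
              omega
          · intro t ht htk hte
            rw [s3 t]
            rw [if_pos (by constructor <;> omega)]
        · -- B skips; A's window is empty or entirely masked already
          rw [if_neg hlt]
          by_cases hek : e ≤ (k : Int)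
          · rw [PySem.List.pyRange_one_eq_nil hek]
            refine ⟨h1, h2, h3, h4, ?_, ?_⟩
            · exact h5
            · intro t ht htk; exact h6 t ht (by omega)
          · have hke : (k : Int) < e := by omega
            have hcovk : (k : Int) < Bk.2 := by omega
            have hlo_cov : lo = Bk.2 := max_eq_right (by omega)
            have hecov : e ≤ Bk.2 := by omega
            have helb : e ≤ (bolos.length : Int) := by omega
            set c := (e - (k : Int)).toNat with hcdef
            have hec : e = (k : Int) + (c : Int) := by omega
            obtain ⟨s1, s2, s3⟩ := inner_spec bolos c k Ak.1 Ak.2 (by rw [h2]; omega)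
            rw [hec, s1]
            have hz : ((PySem.List.pyRange (k : Int) ((k : Int) + (c : Int)) 1).map
                (fun j => if Ak.2.getD j.toNat 0 = 1 then 0 else PySem.List.pyGetD bolos j 0)).sum = 0 := by
              apply List.sum_eq_zero
              intro x hx
              rw [List.mem_map] at hx
              obtain ⟨j, hj, hx⟩ := hx
              rw [PySem.List.mem_pyRange_one] at hj
              have hj0 : 0 ≤ j := by omega
              have hjlb : j.toNat < bolos.length := by omega
              rw [h6 j.toNat hjlb (by omega) (by omega)] at hx
              simpa using hx.symm
            rw [hz]
            refine ⟨by rw [h1]; ring, by rw [s2, h2], h3, h4, ?_, ?_⟩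
            · intro t ht hmask
              rw [s3 t] at hmask
              split_ifs at hmask with hw
              · omega
              · exact h5 t ht hmask
            · intro t ht htk hte
              rw [s3 t]
              split_ifs with hw
              · rfl
              · exact h6 t ht (by omega) hte
      · -- comb[k] != 1: both sides unchanged
        rw [countOuter, if_neg (by rw [hguardA, hgetd]; exact hc)]
        rw [altStep]
        simp only [if_neg hc]
        refine ⟨h1, h2, h3, h4, h5, ?_⟩
        intro t ht htk
        exact h6 t ht (by omega)

-- ===== VERDICT (by name: the statement is the Claim_ definition above) =====
theorem count_spec : Claim_equal_count := by
  intro bolos comb d _ hpre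
  obtain ⟨h1, -, -, -, -, -⟩ := main_inv bolos comb d hpre comb.length (le_refl _)
  unfold Spec_count count count_alt
  simpa [stA, stB] using h1
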